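-- pv_equiv track=rewrite | github.com/bond-lab/Language-and-the-Computer | docs/code/wk07b.py | swear_filter
-- ===== SOURCE A (Python) =====
-- def swear_filter(text, censor_type='full'):
--     """
--     Censors offensive words in a text by replacing them with asterisks or alternatives.
--
--     Parameters:
--         text (str): The text to censor.
--         censor_type (str): 'full' (replace all letters with *),
--                            'partial' (replace all letters except 1st and last),
--                            'bleep' (replace short words with 'bleep' and long words with 'bleepbleep').
--
--     Returns:
--         str: The censored text.
--
--     Example:
--         >>> swear_filter("You are a shit")
--         'You are a ****'
--         >>> swear_filter("You are a shit", censor_type='partial')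
--         'You are a s**t'
--         >>> swear_filter("You are a shit", censor_type='bleep')
--         'You are a bleep'
--         >>> swear_filter("You are a motherfucker", censor_type='bleep')
--         'You are a bleepbleep'
--     """
--     ### check long words first!
--     offensive_words = ["cocksucker", "motherfucker",
--                        "shit", "piss", "fuck", "cunt", "tits"]
--     censored_text = text
--
--     for word in offensive_words:
--         if censor_type == 'full':
--             censored_text = censored_text.replace(word,
--                                                   '*' * len(word))
--         elif censor_type == 'partial':
--             censored_text = censored_text.replace(word,
--                                                   word[0] + '*' * (len(word) - 2) + word[-1])
--         elif censor_type == 'bleep':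
--             if  len(word) > 4:
--                 censored_text = censored_text.replace(word, 'bleepbleep')
--             else:
--                 censored_text = censored_text.replace(word, 'bleep')
--
--     return censored_text
-- ===== SOURCE B (Python) =====
-- OFFENSIVE_WORDS = ["cocksucker", "motherfucker", "shit", "piss", "fuck", "cunt", "tits"]
--
--
-- def swear_filter(text, censor_type='full'):
--     """Build the word->replacement table once for the chosen mode, then censor
--     recursively, one word per recursion step, via split/join."""
--     if censor_type == 'full':
--         table = {w: '*' * len(w) for w in OFFENSIVE_WORDS}
--     elif censor_type == 'partial':
--         table = {w: w[0] + '*' * (len(w) - 2) + w[-1] for w in OFFENSIVE_WORDS}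
--     elif censor_type == 'bleep':
--         table = {w: 'bleepbleep' if len(w) > 4 else 'bleep' for w in OFFENSIVE_WORDS}
--     else:
--         return text
--
--     def censor(t, words):
--         if not words:
--             return t
--         w = words[0]
--         return censor(table[w].join(t.split(w)), words[1:])
--
--     return censor(text, OFFENSIVE_WORDS)
-- ===== Notes on version B (the rewrite author's own statement) =====
-- stated objective: alternative
-- what changed: A dispatches on censor_type inside the word loop and censors with str.replace; B hoists the dispatch out of the loop into a replacement table built once, then censors by structural recursion over the word list, implementing each pass as table[w].join(t.split(w)) instead of str.replace.
import Mathlib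
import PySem

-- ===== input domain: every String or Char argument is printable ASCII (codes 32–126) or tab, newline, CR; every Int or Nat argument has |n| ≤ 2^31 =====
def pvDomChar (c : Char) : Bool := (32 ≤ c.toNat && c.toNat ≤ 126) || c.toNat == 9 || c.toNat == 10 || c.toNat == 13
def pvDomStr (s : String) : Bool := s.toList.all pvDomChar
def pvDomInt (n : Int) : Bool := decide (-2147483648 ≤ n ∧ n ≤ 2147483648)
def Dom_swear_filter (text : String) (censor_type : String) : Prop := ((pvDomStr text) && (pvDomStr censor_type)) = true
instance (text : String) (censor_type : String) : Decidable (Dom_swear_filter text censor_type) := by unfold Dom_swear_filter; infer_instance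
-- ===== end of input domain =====

-- B restructures A: the censor_type dispatch is hoisted out of the word loop into a
-- replacement table built once, and the censoring is a structural recursion over the word
-- list whose pass is table[w].join(t.split(w)) instead of str.replace; same result.

-- ===== PORT A =====
def swear_filter (text : String) (censor_type : String) : String :=
  let offensive_words : List String :=
    ["cocksucker", "motherfucker", "shit", "piss", "fuck", "cunt", "tits"]
  let censored_text := text
  offensive_words.foldl (fun censored_text word =>
    if censor_type = "full" then
      PySem.Str.replace censored_text word
        (String.ofList (PySem.List.pyRepeat ['*'] (PySem.Str.len word)))
    else if censor_type = "partial" then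
      -- word[0] / word[-1]: the seven words are nonempty literals, so pyGet? is `some`;
      -- Option.toList is exact here
      PySem.Str.replace censored_text word
        (String.ofList ((PySem.Str.pyGet? word 0).toList ++
          PySem.List.pyRepeat ['*'] (PySem.Str.len word - 2) ++
          (PySem.Str.pyGet? word (-1)).toList))
    else if censor_type = "bleep" then
      if PySem.Str.len word > 4 then PySem.Str.replace censored_text word "bleepbleep"
      else PySem.Str.replace censored_text word "bleep"
    else censored_text) censored_text

-- ===== PORT B =====
def pvOffensiveWords : List String :=
  ["cocksucker", "motherfucker", "shit", "piss", "fuck", "cunt", "tits"]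

-- {w: repl(w) for w in OFFENSIVE_WORDS}
def pvMkTable (repl : String → String) : PySem.Dict String String :=
  pvOffensiveWords.foldl (fun d w => d.insert w (repl w)) PySem.Dict.empty

-- censor(t, words): table[w] never misses (all words are keys) and t.split(w) never raises
-- (the words are nonempty literals), so the getD defaults are dead; exact here
def pvCensor (table : PySem.Dict String String) (t : String) (ws : List String) : String :=
  match ws with
  | [] => t
  | w :: rest =>
    pvCensor table (PySem.Str.join (PySem.Dict.getD table w "") ((PySem.Str.split? t w).getD [])) rest

def swear_filter_alt (text : String) (censor_type : String) : String :=
  if censor_type = "full" then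
    pvCensor (pvMkTable (fun w => String.ofList (PySem.List.pyRepeat ['*'] (PySem.Str.len w))))
      text pvOffensiveWords
  else if censor_type = "partial" then
    pvCensor (pvMkTable (fun w => String.ofList ((PySem.Str.pyGet? w 0).toList ++
        PySem.List.pyRepeat ['*'] (PySem.Str.len w - 2) ++ (PySem.Str.pyGet? w (-1)).toList)))
      text pvOffensiveWords
  else if censor_type = "bleep" then
    pvCensor (pvMkTable (fun w => if PySem.Str.len w > 4 then "bleepbleep" else "bleep"))
      text pvOffensiveWords
  else text

-- ===== PRECONDITION & SPEC =====
def Spec_swear_filter (text : String) (censor_type : String) (out : String) : Prop :=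
  out = swear_filter_alt text censor_type

instance (text : String) (censor_type : String) (out : String) :
    Decidable (Spec_swear_filter text censor_type out) := by
  unfold Spec_swear_filter; infer_instance

-- ===== CLAIM (what is proved, stated in full; the proofs are below) =====
def Claim_equal_swear_filter : Prop := ∀ (text : String) (censor_type : String), Dom_swear_filter text censor_type → Spec_swear_filter text censor_type (swear_filter text censor_type)

-- ===== LEMMAS AND PROOFS =====

-- Python str.replace (non-empty pattern) as a structural left-to-right recursion
def pvRepl1 (old new : List Char) : List Char → List Char
  | [] => []
  | c :: t =>
    if old.isPrefixOf (c :: t) then new ++ pvRepl1 old new (t.drop (old.length - 1))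
    else c :: pvRepl1 old new t
termination_by l => l.length
decreasing_by all_goals (simp; try omega)

lemma pvRepl1_nil (old new : List Char) : pvRepl1 old new [] = [] := by rw [pvRepl1]

lemma pvRepl1_cons_pos (old new : List Char) (c : Char) (t : List Char)
    (h : old.isPrefixOf (c :: t)) :
    pvRepl1 old new (c :: t) = new ++ pvRepl1 old new (t.drop (old.length - 1)) := by
  rw [pvRepl1, if_pos h]

lemma pvRepl1_cons_neg (old new : List Char) (c : Char) (t : List Char)
    (h : ¬ old.isPrefixOf (c :: t)) :
    pvRepl1 old new (c :: t) = c :: pvRepl1 old new t := by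
  rw [pvRepl1, if_neg h]

lemma pvGo_spec (old new : List Char) (ho : old ≠ []) :
    ∀ fuel (l acc : List Char), l.length ≤ fuel →
      PySem.Chars.replace.go old new fuel l acc = acc.reverse ++ pvRepl1 old new l := by
  intro fuel
  induction fuel with
  | zero =>
    intro l acc h
    have hl : l = [] := by cases l with | nil => rfl | cons a t => simp at h
    subst hl
    simp [PySem.Chars.replace.go, pvRepl1_nil]
  | succ f ih =>
    intro l acc h
    cases l with
    | nil => simp [PySem.Chars.replace.go, pvRepl1_nil]
    | cons c t =>
      obtain ⟨o, old', rfl⟩ : ∃ o old', old = o :: old' := by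
        cases old with
        | nil => exact absurd rfl ho
        | cons o old' => exact ⟨o, old', rfl⟩
      by_cases hp : (o :: old').isPrefixOf (c :: t)
      · rw [PySem.Chars.replace.go, if_pos hp, pvRepl1_cons_pos _ _ _ _ hp]
        rw [ih _ _ (by simp at h ⊢; omega)]
        simp
      · rw [PySem.Chars.replace.go, if_neg hp, pvRepl1_cons_neg _ _ _ _ hp]
        rw [ih _ _ (by simp at h ⊢; omega)]
        simp

lemma pvReplace_eq (old new s : List Char) (ho : old.isEmpty = false) :
    PySem.Chars.replace s old new = pvRepl1 old new s := by
  have ho' : old ≠ [] := by cases old <;> simp_all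
  rw [PySem.Chars.replace, if_neg (by simp [ho])]
  simpa using pvGo_spec old new ho' s.length s [] le_rfl

-- Python str.split (non-empty separator) as a structural left-to-right recursion
def pvSplit1 (sep : List Char) : List Char → List (List Char)
  | [] => [[]]
  | c :: t =>
    if sep.isPrefixOf (c :: t) then [] :: pvSplit1 sep (t.drop (sep.length - 1))
    else
      match pvSplit1 sep t with
      | [] => [[c]]
      | p :: ps => (c :: p) :: ps
termination_by l => l.length
decreasing_by all_goals (simp; try omega)

lemma pvSplit1_nil (sep : List Char) : pvSplit1 sep [] = [[]] := by rw [pvSplit1]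

lemma pvSplit1_cons_pos (sep : List Char) (c : Char) (t : List Char)
    (h : sep.isPrefixOf (c :: t)) :
    pvSplit1 sep (c :: t) = [] :: pvSplit1 sep (t.drop (sep.length - 1)) := by
  rw [pvSplit1, if_pos h]

lemma pvSplit1_cons_neg (sep : List Char) (c : Char) (t : List Char)
    (h : ¬ sep.isPrefixOf (c :: t)) :
    pvSplit1 sep (c :: t) =
      match pvSplit1 sep t with
      | [] => [[c]]
      | p :: ps => (c :: p) :: ps := by
  rw [pvSplit1, if_neg h]

lemma pvSplit1_ne_nil (sep l : List Char) : pvSplit1 sep l ≠ [] := by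
  cases l with
  | nil => rw [pvSplit1_nil]; simp
  | cons c t =>
    by_cases h : sep.isPrefixOf (c :: t)
    · rw [pvSplit1_cons_pos _ _ _ h]; simp
    · rw [pvSplit1_cons_neg _ _ _ h]
      cases pvSplit1 sep t <;> simp

-- prepend x onto the first piece
def pvPre (x : List Char) : List (List Char) → List (List Char)
  | [] => [x]
  | p :: ps => (x ++ p) :: ps

lemma pvPre_nil (X : List (List Char)) (h : X ≠ []) : pvPre [] X = X := by
  cases X with
  | nil => exact absurd rfl h
  | cons p ps => simp [pvPre]

lemma pvSplitGo_spec (sep : List Char) (hs : sep ≠ []) :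
    ∀ fuel (l cur : List Char) (acc : List (List Char)), l.length ≤ fuel →
      PySem.Chars.splitOn.go sep fuel l cur acc
        = acc.reverse ++ pvPre cur.reverse (pvSplit1 sep l) := by
  intro fuel
  induction fuel with
  | zero =>
    intro l cur acc h
    have hl : l = [] := by cases l with | nil => rfl | cons a t => simp at h
    subst hl
    simp [PySem.Chars.splitOn.go, pvSplit1_nil, pvPre]
  | succ f ih =>
    intro l cur acc h
    cases l with
    | nil => simp [PySem.Chars.splitOn.go, pvSplit1_nil, pvPre]
    | cons c t =>
      obtain ⟨o, sep', rfl⟩ : ∃ o sep', sep = o :: sep' := by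
        cases sep with
        | nil => exact absurd rfl hs
        | cons o sep' => exact ⟨o, sep', rfl⟩
      by_cases hp : (o :: sep').isPrefixOf (c :: t)
      · rw [PySem.Chars.splitOn.go, if_pos hp, pvSplit1_cons_pos _ _ _ hp]
        rw [show List.drop (o :: sep').length (c :: t) = t.drop ((o :: sep').length - 1) from by simp]
        rw [ih _ _ _ (by simp at h ⊢; omega)]
        simp only [List.reverse_nil]
        rw [pvPre_nil _ (pvSplit1_ne_nil _ _)]
        simp [pvPre]
      · rw [PySem.Chars.splitOn.go, if_neg hp, pvSplit1_cons_neg _ _ _ hp]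
        rw [ih _ _ _ (by simp at h; omega)]
        obtain ⟨p, ps, hps⟩ : ∃ p ps, pvSplit1 (o :: sep') t = p :: ps := by
          cases hP : pvSplit1 (o :: sep') t with
          | nil => exact absurd hP (pvSplit1_ne_nil _ _)
          | cons p ps => exact ⟨p, ps, rfl⟩
        rw [hps]
        simp [pvPre]

lemma pvSplitOn_eq (s sep : List Char) (hs : sep ≠ []) :
    PySem.Chars.splitOn s sep = pvSplit1 sep s := by
  rw [PySem.Chars.splitOn, pvSplitGo_spec sep hs (s.length + 1) s [] [] (by omega)]
  simpa using pvPre_nil _ (pvSplit1_ne_nil sep s)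

lemma pvJoin_consHead (new p : List Char) (c : Char) (ps : List (List Char)) :
    PySem.Chars.join new ((c :: p) :: ps) = c :: PySem.Chars.join new (p :: ps) := by
  cases ps with
  | nil => simp [PySem.Chars.join_singleton]
  | cons q qs => simp [PySem.Chars.join_cons_cons]

lemma pvJoinSplit1 (sep new : List Char) (_hs : sep ≠ []) :
    ∀ l, PySem.Chars.join new (pvSplit1 sep l) = pvRepl1 sep new l := by
  suffices hmain : ∀ n (l : List Char), l.length ≤ n →
      PySem.Chars.join new (pvSplit1 sep l) = pvRepl1 sep new l by
    intro l; exact hmain l.length l le_rfl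
  intro n
  induction n with
  | zero =>
    intro l h
    have hl : l = [] := by cases l with | nil => rfl | cons a t => simp at h
    subst hl
    simp [pvSplit1_nil, pvRepl1_nil, PySem.Chars.join_singleton]
  | succ m ih =>
    intro l h
    cases l with
    | nil => simp [pvSplit1_nil, pvRepl1_nil, PySem.Chars.join_singleton]
    | cons c t =>
      by_cases hp : sep.isPrefixOf (c :: t)
      · rw [pvSplit1_cons_pos _ _ _ hp, pvRepl1_cons_pos _ _ _ _ hp]
        obtain ⟨p, ps, hps⟩ : ∃ p ps, pvSplit1 sep (t.drop (sep.length - 1)) = p :: ps := by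
          cases hP : pvSplit1 sep (t.drop (sep.length - 1)) with
          | nil => exact absurd hP (pvSplit1_ne_nil _ _)
          | cons p ps => exact ⟨p, ps, rfl⟩
        rw [hps, PySem.Chars.join_cons_cons, ← hps, ih _ (by simp at h ⊢; omega)]
        simp
      · rw [pvSplit1_cons_neg _ _ _ hp, pvRepl1_cons_neg _ _ _ _ hp]
        obtain ⟨p, ps, hps⟩ : ∃ p ps, pvSplit1 sep t = p :: ps := by
          cases hP : pvSplit1 sep t with
          | nil => exact absurd hP (pvSplit1_ne_nil _ _)
          | cons p ps => exact ⟨p, ps, rfl⟩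
        rw [hps]
        rw [pvJoin_consHead, ← hps, ih _ (by simp at h; omega)]

-- ''.join/str.split and str.replace compute the same pass (non-empty pattern)
lemma pvJoinSplitReplace (s old new : List Char) (ho : old ≠ []) :
    PySem.Chars.join new (PySem.Chars.splitOn s old) = PySem.Chars.replace s old new := by
  rw [pvSplitOn_eq _ _ ho, pvJoinSplit1 _ _ ho, pvReplace_eq _ _ _ (by cases old <;> simp_all)]

lemma pvStep (t w r : String) (hw : w.toList ≠ []) :
    PySem.Str.join r ((PySem.Str.split? t w).getD []) = PySem.Str.replace t w r := by
  apply String.toList_inj.mp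
  rw [PySem.Str.split?, PySem.Chars.split?, if_neg (by simp [hw])]
  simp only [Option.map_some, Option.getD_some, PySem.Str.toList_join, List.map_map]
  rw [show (String.toList ∘ String.ofList) = id from funext (fun l => String.toList_ofList)]
  rw [List.map_id, PySem.Str.toList_replace]
  exact pvJoinSplitReplace _ _ _ hw

lemma pvStep1 (t r : String) :
    PySem.Str.join r ((PySem.Str.split? t "cocksucker").getD []) = PySem.Str.replace t "cocksucker" r :=
  pvStep _ _ _ (by decide)
lemma pvStep2 (t r : String) :
    PySem.Str.join r ((PySem.Str.split? t "motherfucker").getD []) = PySem.Str.replace t "motherfucker" r :=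
  pvStep _ _ _ (by decide)
lemma pvStep3 (t r : String) :
    PySem.Str.join r ((PySem.Str.split? t "shit").getD []) = PySem.Str.replace t "shit" r :=
  pvStep _ _ _ (by decide)
lemma pvStep4 (t r : String) :
    PySem.Str.join r ((PySem.Str.split? t "piss").getD []) = PySem.Str.replace t "piss" r :=
  pvStep _ _ _ (by decide)
lemma pvStep5 (t r : String) :
    PySem.Str.join r ((PySem.Str.split? t "fuck").getD []) = PySem.Str.replace t "fuck" r :=
  pvStep _ _ _ (by decide)
lemma pvStep6 (t r : String) :
    PySem.Str.join r ((PySem.Str.split? t "cunt").getD []) = PySem.Str.replace t "cunt" r :=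
  pvStep _ _ _ (by decide)
lemma pvStep7 (t r : String) :
    PySem.Str.join r ((PySem.Str.split? t "tits").getD []) = PySem.Str.replace t "tits" r :=
  pvStep _ _ _ (by decide)

lemma pvAlt_full (text : String) :
    swear_filter_alt text "full" = swear_filter text "full" := by
  simp only [swear_filter_alt, String.reduceEq, reduceIte, pvOffensiveWords, pvCensor,
    pvStep1, pvStep2, pvStep3, pvStep4, pvStep5, pvStep6, pvStep7]
  simp only [swear_filter, List.foldl_cons, List.foldl_nil, String.reduceEq, reduceIte]
  rfl

lemma pvAlt_partial (text : String) :
    swear_filter_alt text "partial" = swear_filter text "partial" := by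
  simp only [swear_filter_alt, String.reduceEq, reduceIte, pvOffensiveWords, pvCensor,
    pvStep1, pvStep2, pvStep3, pvStep4, pvStep5, pvStep6, pvStep7]
  simp only [swear_filter, List.foldl_cons, List.foldl_nil, String.reduceEq, reduceIte]
  rfl

lemma pvAlt_bleep (text : String) :
    swear_filter_alt text "bleep" = swear_filter text "bleep" := by
  simp only [swear_filter_alt, String.reduceEq, reduceIte, pvOffensiveWords, pvCensor,
    pvStep1, pvStep2, pvStep3, pvStep4, pvStep5, pvStep6, pvStep7]
  simp only [swear_filter, List.foldl_cons, List.foldl_nil, String.reduceEq, reduceIte,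
    eq_true (by decide : PySem.Str.len "cocksucker" > 4),
    eq_true (by decide : PySem.Str.len "motherfucker" > 4),
    eq_false (by decide : ¬ (PySem.Str.len "shit" > 4)),
    eq_false (by decide : ¬ (PySem.Str.len "piss" > 4)),
    eq_false (by decide : ¬ (PySem.Str.len "fuck" > 4)),
    eq_false (by decide : ¬ (PySem.Str.len "cunt" > 4)),
    eq_false (by decide : ¬ (PySem.Str.len "tits" > 4))]
  rfl

lemma pvAlt_other (text ct : String) (h1 : ct ≠ "full") (h2 : ct ≠ "partial")
    (h3 : ct ≠ "bleep") : swear_filter_alt text ct = swear_filter text ct := by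
  rw [swear_filter_alt, if_neg h1, if_neg h2, if_neg h3]
  simp only [swear_filter, List.foldl_cons, List.foldl_nil,
    eq_false h1, eq_false h2, eq_false h3, if_false]

-- ===== VERDICT (by name: the statement is the Claim_ definition above) =====
theorem swear_filter_spec : Claim_equal_swear_filter := by
  intro text ct _
  unfold Spec_swear_filter
  by_cases hf : ct = "full"
  · subst hf; exact (pvAlt_full text).symm
  · by_cases hp : ct = "partial"
    · subst hp; exact (pvAlt_partial text).symm
    · by_cases hb : ct = "bleep"
      · subst hb; exact (pvAlt_bleep text).symm
      · exact (pvAlt_other text ct hf hp hb).symm
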